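-- pv_equiv track=rewrite | github.com/ejuun/back_problem | 1244.py | woman
-- ===== SOURCE A (Python) =====
-- def woman(switch_list, n):
--     if len(switch_list) == 1:
--         if switch_list[n - 1] == 1:
--             switch_list[n - 1] = 0
--         else:
--             switch_list[n - 1] = 1
--         return switch_list
--     elif len(switch_list) == 2:
--         if switch_list[n - 1] == 1:
--             switch_list[n - 1] = 0
--         else:
--             switch_list[n - 1] = 1
--         return switch_list
--     else:
--         if switch_list[n - 2] != switch_list[n] or n - 1 == 0 or n == len(switch_list):
--             if switch_list[n - 1] == 1:
--                 switch_list[n - 1] = 0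
--             else:
--                 switch_list[n - 1] = 1
--
--             return switch_list
--
--         else:
--             if switch_list[(n - 1)] == 1:
--                 switch_list[(n - 1)] = 0
--             else:
--                 switch_list[(n - 1)] = 1
--
--             i = 1
--             while switch_list[(n - 1) - i] == switch_list[(n - 1) + i]:
--
--                 if switch_list[(n - 1) - i] == 1:
--                     switch_list[(n - 1) - i] = 0
--                     switch_list[(n - 1) + i] = 0
--                 else:
--                     switch_list[(n - 1) - i] = 1
--                     switch_list[(n - 1) + i] = 1
--                 if n - i - 1 == 0 or n - 1 + i == len(switch_list) - 1:
--                     break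
--                 i += 1
--             return switch_list
-- ===== SOURCE B (Python) =====
-- def woman(switch_list, n):
--     c = (n - 1) % len(switch_list)  # Python-style negative position support
--     r = 0
--     for x, y in zip(reversed(switch_list[:c]), switch_list[c + 1:]):
--         if x != y:
--             break
--         r += 1
--     band = [0 if x == 1 else 1 for x in switch_list[c - r:c + r + 1]]
--     return switch_list[:c - r] + band + switch_list[c + r + 1:]
-- ===== Notes on version B (the rewrite author's own statement) =====
-- stated objective: simpler
-- what changed: A mutates the list in place, expanding outward from n-1 with an interleaved read-and-toggle while loop under a len==1/len==2/guard case tree; B never mutates or walks expansion indices: it normalises the centre with Python's `% len`, zips the reversed left slice against the right slice to get the matching width r, toggles the slice [c-r:c+r+1] with a comprehension, and rebuilds the result by slice concatenation.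
-- outside the precondition, e.g. on woman([0, 0, 1, 0, 0], 0): A returns [1, 0, 1, 1, 1], B returns [0, 0, 1, 0, 1]
import Mathlib
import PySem

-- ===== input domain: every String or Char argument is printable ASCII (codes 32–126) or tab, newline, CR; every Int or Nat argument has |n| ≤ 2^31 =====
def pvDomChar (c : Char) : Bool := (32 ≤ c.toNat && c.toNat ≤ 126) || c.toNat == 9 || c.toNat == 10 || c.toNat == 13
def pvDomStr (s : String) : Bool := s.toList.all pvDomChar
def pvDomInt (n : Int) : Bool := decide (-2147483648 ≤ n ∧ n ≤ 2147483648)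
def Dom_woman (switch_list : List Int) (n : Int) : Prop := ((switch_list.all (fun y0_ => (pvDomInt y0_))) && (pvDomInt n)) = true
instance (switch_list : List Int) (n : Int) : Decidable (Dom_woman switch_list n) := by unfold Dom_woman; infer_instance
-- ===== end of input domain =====

-- B replaces A's in-place outward expansion (interleaved read-and-toggle while loop under a
-- len==1/len==2/guard case tree) by a non-mutating slice computation: normalise the centre with
-- Python's `% len` (negative-position support), zip the reversed left slice against the right
-- slice for the matching width, toggle that slice by comprehension, rebuild by concatenation
-- (simpler).  A mutates switch_list in place in Python, B does not: the equivalence proved here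
-- is about the return value.

-- ===== PORT A =====
-- A's repeated "if s[k] == 1: s[k] = 0 else: s[k] = 1" toggle-assignment at index k
def womanFlip (s : List Int) (k : Int) : List Int :=
  if PySem.List.pyGetD s k 0 = 1 then PySem.List.pySetD s k 0 else PySem.List.pySetD s k 1

-- A's while loop; one fuel per iteration (s.length is plenty: i grows and stays in range under Pre_)
def womanWhile (s : List Int) (n : Int) (i : Int) : Nat → List Int
  | 0 => s
  | fuel+1 =>
    if PySem.List.pyGetD s (n - 1 - i) 0 = PySem.List.pyGetD s (n - 1 + i) 0 then
      let s' := if PySem.List.pyGetD s (n - 1 - i) 0 = 1 then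
                  PySem.List.pySetD (PySem.List.pySetD s (n - 1 - i) 0) (n - 1 + i) 0
                else
                  PySem.List.pySetD (PySem.List.pySetD s (n - 1 - i) 1) (n - 1 + i) 1
      if n - i - 1 = 0 ∨ n - 1 + i = (s'.length : Int) - 1 then s'
      else womanWhile s' n (i + 1) fuel
    else s

def woman (switch_list : List Int) (n : Int) : List Int :=
  if switch_list.length = 1 then womanFlip switch_list (n - 1)
  else if switch_list.length = 2 then womanFlip switch_list (n - 1)
  else
    if PySem.List.pyGetD switch_list (n - 2) 0 ≠ PySem.List.pyGetD switch_list n 0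
        ∨ n - 1 = 0 ∨ n = (switch_list.length : Int) then
      womanFlip switch_list (n - 1)
    else
      womanWhile (womanFlip switch_list (n - 1)) n 1 switch_list.length

-- ===== PORT B =====
-- B's "for x, y in zip(...): if x != y: break; r += 1" loop, as structural recursion on the zip
def womanZip : List (Int × Int) → Int
  | [] => 0
  | (x, y) :: ps => if x ≠ y then 0 else womanZip ps + 1

def woman_alt (switch_list : List Int) (n : Int) : List Int :=
  let c := PySem.Int.mod (n - 1) (switch_list.length : Int)
  let r := womanZip (((PySem.List.slice switch_list none (some c)).reverse).zip
                      (PySem.List.slice switch_list (some (c + 1)) none))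
  let band := (PySem.List.slice switch_list (some (c - r)) (some (c + r + 1))).map
                (fun x => if x = 1 then 0 else 1)
  PySem.List.slice switch_list none (some (c - r)) ++ band ++
    PySem.List.slice switch_list (some (c + r + 1)) none

-- ===== PRECONDITION & SPEC =====
-- Pre_ is the 1-based switch-index domain 1 <= n <= len (n < len once len >= 3), plus the n <= 0
-- inputs on which Python's negative-index wraparound makes both programs do the same single toggle
-- at s[n-1] (len <= 2, or s[n-2] != s[n] so that A does not expand).  Excluded inputs are exactly
-- those where A raises IndexError (n = len with len >= 3, the empty list, far out-of-range n) or
-- returns an accidental value by expanding across the list ends via wraparound (n <= 0 with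
-- s[n-2] == s[n]).
def Pre_woman (switch_list : List Int) (n : Int) : Prop :=
  1 ≤ switch_list.length ∧
    ((1 ≤ n ∧ n ≤ (switch_list.length : Int) ∧
        (3 ≤ switch_list.length → n < (switch_list.length : Int)))
      ∨ (n ≤ 0 ∧
          ((2 - n ≤ (switch_list.length : Int) ∧
              PySem.List.pyGetD switch_list (n - 2) 0 ≠ PySem.List.pyGetD switch_list n 0)
            ∨ (1 - (switch_list.length : Int) ≤ n ∧ switch_list.length ≤ 2))))
instance (switch_list : List Int) (n : Int) : Decidable (Pre_woman switch_list n) := by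
  unfold Pre_woman; infer_instance

def pvWitness_woman : List Int × Int := ([1, 0, 1], 2)

def Spec_woman (switch_list : List Int) (n : Int) (out : List Int) : Prop := out = woman_alt switch_list n
instance (switch_list : List Int) (n : Int) (out : List Int) : Decidable (Spec_woman switch_list n out) := by
  unfold Spec_woman; infer_instance

-- ===== CLAIM =====
def Claim_equal_woman : Prop := ∀ (switch_list : List Int) (n : Int), Dom_woman switch_list n → Pre_woman switch_list n → Spec_woman switch_list n (woman switch_list n)

-- ===== LEMMAS AND PROOFS =====

-- the toggle value
def tog (x : Int) : Int := if x = 1 then 0 else 1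

-- reference form: toggle every index in the band [a, b]
def togR (a b : Int) (s : List Int) : List Int :=
  s.mapIdx (fun j x => if a ≤ (j : Int) ∧ (j : Int) ≤ b then tog x else x)

theorem length_togR (a b : Int) (s : List Int) : (togR a b s).length = s.length := by
  simp [togR]

theorem getElem_togR (a b : Int) (s : List Int) (k : Nat) (hk : k < s.length) :
    (togR a b s)[k]'(by simpa [length_togR] using hk) =
      if a ≤ (k : Int) ∧ (k : Int) ≤ b then tog s[k] else s[k] := by
  simp [togR]

-- pyGetD on a nonneg in-range index, as getElem (specialisation used throughout)
theorem pyGetD_idx (s : List Int) (j : Int) (h0 : 0 ≤ j) (h1 : j < (s.length : Int)) :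
    PySem.List.pyGetD s j 0 = s[j.toNat]'(by omega) := by
  exact PySem.List.pyGetD_eq_getElem s 0 h0 h1

-- reading togR outside the band is reading the original list
theorem pyGetD_togR_outside (a b j : Int) (s : List Int)
    (h0 : 0 ≤ j) (h1 : j < (s.length : Int)) (hout : j < a ∨ b < j) :
    PySem.List.pyGetD (togR a b s) j 0 = PySem.List.pyGetD s j 0 := by
  rw [pyGetD_idx (togR a b s) j h0 (by rw [length_togR]; exact h1),
      pyGetD_idx s j h0 h1, getElem_togR a b s j.toNat (by omega)]
  rw [if_neg (by omega)]

-- A's single toggle-assignment is the one-point band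
theorem womanFlip_eq_togR (s : List Int) (c : Int) (h0 : 0 ≤ c) (h1 : c < (s.length : Int)) :
    womanFlip s c = togR c c s := by
  unfold womanFlip
  rw [pyGetD_idx s c h0 h1, PySem.List.pySetD_of_nonneg s 0 h0, PySem.List.pySetD_of_nonneg s 1 h0]
  have main : ∀ v : Int, v = tog (s[c.toNat]'(by omega)) → s.set c.toNat v = togR c c s := by
    intro v hv
    apply List.ext_getElem (by simp [length_togR])
    intro k hk hk'
    have hk2 : k < s.length := by simpa using hk
    rw [getElem_togR c c s k hk2]
    by_cases hkc : k = c.toNat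
    · rw [if_pos (by omega)]
      simp [hkc, hv]
    · rw [if_neg (by omega)]
      simp [Ne.symm hkc]
  by_cases hv : s[c.toNat]'(by omega) = 1
  · rw [if_pos hv]; exact main 0 (by simp [tog, hv])
  · rw [if_neg hv]; exact main 1 (by simp [tog, hv])

-- A's symmetric double toggle-assignment extends the band by one on each side
theorem togR_extend (a b : Int) (s : List Int)
    (h0 : 0 ≤ a) (hab : a + 2 ≤ b) (h1 : b < (s.length : Int))
    (hv : PySem.List.pyGetD s a 0 = PySem.List.pyGetD s b 0) :
    (if PySem.List.pyGetD (togR (a+1) (b-1) s) a 0 = 1 then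
       PySem.List.pySetD (PySem.List.pySetD (togR (a+1) (b-1) s) a 0) b 0
     else
       PySem.List.pySetD (PySem.List.pySetD (togR (a+1) (b-1) s) a 1) b 1)
      = togR a b s := by
  have hlen : (togR (a+1) (b-1) s).length = s.length := length_togR _ _ s
  rw [pyGetD_togR_outside _ _ _ _ h0 (by omega) (by omega), pyGetD_idx _ _ h0 (by omega)]
  have hvb := hv
  rw [pyGetD_idx _ _ h0 (by omega), pyGetD_idx _ _ (by omega) h1] at hvb
  have hset : ∀ v : Int,
      PySem.List.pySetD (PySem.List.pySetD (togR (a+1) (b-1) s) a v) b v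
        = ((togR (a+1) (b-1) s).set a.toNat v).set b.toNat v := by
    intro v
    rw [PySem.List.pySetD_of_nonneg _ v h0, PySem.List.pySetD_of_nonneg _ v (by omega : (0:Int) ≤ b)]
  have key : ∀ v : Int, v = tog (s[a.toNat]'(by omega)) →
      ((togR (a+1) (b-1) s).set a.toNat v).set b.toNat v = togR a b s := by
    intro v hvdef
    apply List.ext_getElem (by simp [length_togR])
    intro k hk hk'
    have hk2 : k < s.length := by simpa [length_togR] using hk
    rw [getElem_togR a b s k hk2]
    by_cases hkb : k = b.toNat
    · subst hkb
      rw [if_pos (by omega)]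
      simp [hvdef, ← hvb, tog]
    · by_cases hka : k = a.toNat
      · subst hka
        rw [if_pos (by omega)]
        simp [Ne.symm hkb, hvdef, tog]
      · rw [List.getElem_set_ne (Ne.symm hkb), List.getElem_set_ne (Ne.symm hka),
            getElem_togR (a+1) (b-1) s k hk2]
        by_cases hband : a ≤ (k:Int) ∧ (k:Int) ≤ b
        · rw [if_pos (by omega), if_pos hband]
        · rw [if_neg (by omega), if_neg hband]
  split <;> rename_i hv1
  · rw [hset 0, key 0 (by simp [tog, hv1])]
  · rw [hset 1, key 1 (by simp [tog, hv1])]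

-- proof-side reference radius (greedy expansion, aligned with A's while loop)
def radAux (s : List Int) (c : Int) (r : Int) : Nat → Int
  | 0 => r
  | fuel+1 =>
    if 0 ≤ c - r - 1 ∧ c + r + 1 < (s.length : Int) ∧
        PySem.List.pyGetD s (c - r - 1) 0 = PySem.List.pyGetD s (c + r + 1) 0 then
      radAux s c (r + 1) fuel
    else r

-- the characterisation both radii satisfy
def RadSpec (s : List Int) (c r : Int) : Prop :=
  0 ≤ r ∧ 0 ≤ c - r ∧ c + r < (s.length : Int) ∧
    (∀ k : Int, 0 ≤ k → k < r →
      PySem.List.pyGetD s (c - 1 - k) 0 = PySem.List.pyGetD s (c + 1 + k) 0) ∧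
    ¬ (0 ≤ c - r - 1 ∧ c + r + 1 < (s.length : Int) ∧
        PySem.List.pyGetD s (c - r - 1) 0 = PySem.List.pyGetD s (c + r + 1) 0)

theorem RadSpec_unique (s : List Int) (c r1 r2 : Int)
    (h1 : RadSpec s c r1) (h2 : RadSpec s c r2) : r1 = r2 := by
  obtain ⟨a1, b1, c1, m1, st1⟩ := h1
  obtain ⟨a2, b2, c2, m2, st2⟩ := h2
  by_contra hne
  rcases lt_or_gt_of_ne hne with hlt | hlt
  · exact st1 ⟨by omega, by omega, by
      have := m2 r1 a1 hlt
      have e1 : c - 1 - r1 = c - r1 - 1 := by ring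
      have e2 : c + 1 + r1 = c + r1 + 1 := by ring
      rw [e1, e2] at this; exact this⟩
  · exact st2 ⟨by omega, by omega, by
      have := m1 r2 a2 hlt
      have e1 : c - 1 - r2 = c - r2 - 1 := by ring
      have e2 : c + 1 + r2 = c + r2 + 1 := by ring
      rw [e1, e2] at this; exact this⟩

theorem radAux_stop (s : List Int) (c r : Int) (fuel : Nat)
    (h : ¬ (0 ≤ c - r - 1 ∧ c + r + 1 < (s.length : Int) ∧
            PySem.List.pyGetD s (c - r - 1) 0 = PySem.List.pyGetD s (c + r + 1) 0)) :
    radAux s c r fuel = r := by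
  cases fuel with
  | zero => rfl
  | succ f => rw [radAux, if_neg h]

theorem radAux_spec (s : List Int) (c : Int) :
    ∀ (fuel : Nat) (r : Int), 0 ≤ r → 0 ≤ c - r → c + r < (s.length : Int) →
      (∀ k : Int, 0 ≤ k → k < r →
        PySem.List.pyGetD s (c - 1 - k) 0 = PySem.List.pyGetD s (c + 1 + k) 0) →
      c - r < (fuel : Int) → RadSpec s c (radAux s c r fuel) := by
  intro fuel
  induction fuel with
  | zero => intro r h0 h1 h2 hm hf; omega
  | succ f ih =>
    intro r h0 h1 h2 hm hf
    by_cases hc : 0 ≤ c - r - 1 ∧ c + r + 1 < (s.length : Int) ∧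
        PySem.List.pyGetD s (c - r - 1) 0 = PySem.List.pyGetD s (c + r + 1) 0
    · rw [radAux, if_pos hc]
      refine ih (r + 1) (by omega) (by omega) (by omega) ?_ (by omega)
      intro k hk0 hk1
      by_cases hkr : k = r
      · subst hkr
        have e1 : c - 1 - k = c - k - 1 := by ring
        have e2 : c + 1 + k = c + k + 1 := by ring
        rw [e1, e2]; exact hc.2.2
      · exact hm k hk0 (by omega)
    · rw [radAux, if_neg hc]
      exact ⟨h0, h1, h2, hm, hc⟩

-- B's zip loop: generic prefix-match characterisation
theorem womanZip_spec (l1 : List Int) :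
    ∀ l2 : List Int, ∃ rn : Nat, womanZip (l1.zip l2) = (rn : Int) ∧
      rn ≤ l1.length ∧ rn ≤ l2.length ∧
      (∀ k : Nat, k < rn → l1[k]? = l2[k]?) ∧
      (rn = l1.length ∨ rn = l2.length ∨
        (∃ a b : Int, l1[rn]? = some a ∧ l2[rn]? = some b ∧ a ≠ b)) := by
  induction l1 with
  | nil =>
    intro l2
    exact ⟨0, by simp [womanZip], by simp, by simp, by omega, Or.inl rfl⟩
  | cons x xs ih =>
    intro l2
    cases l2 with
    | nil => exact ⟨0, by simp [womanZip], by simp, by simp, by omega, Or.inr (Or.inl rfl)⟩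
    | cons y ys =>
      by_cases hxy : x = y
      · obtain ⟨rn, hz, hl1, hl2, hm, hst⟩ := ih ys
        refine ⟨rn + 1, ?_, by simpa using hl1, by simpa using hl2, ?_, ?_⟩
        · simp [womanZip, hxy, hz]
        · intro k hk
          cases k with
          | zero => simp [hxy]
          | succ j => simpa using hm j (by omega)
        · rcases hst with h | h | ⟨a, b, ha, hb, hab⟩
          · exact Or.inl (by simp [h])
          · exact Or.inr (Or.inl (by simp [h]))
          · exact Or.inr (Or.inr ⟨a, b, by simpa using ha, by simpa using hb, hab⟩)
      · refine ⟨0, ?_, by simp, by simp, by omega,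
          Or.inr (Or.inr ⟨x, y, by simp, by simp, hxy⟩)⟩
        simp [womanZip, hxy]

-- B's radius satisfies RadSpec
theorem womanZip_RadSpec (s : List Int) (c : Int) (h0 : 0 ≤ c) (h1 : c < (s.length : Int)) :
    RadSpec s c (womanZip (((s.take c.toNat).reverse).zip (s.drop (c.toNat + 1)))) := by
  lift c to ℕ using h0 with cn
  simp only [Int.toNat_natCast]
  obtain ⟨rn, hz, hl1, hl2, hm, hst⟩ := womanZip_spec ((s.take cn).reverse) (s.drop (cn + 1))
  rw [hz]
  have hcl : cn < s.length := by exact_mod_cast h1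
  have hlen1 : ((s.take cn).reverse).length = cn := by simp; omega
  have hlen2 : (s.drop (cn + 1)).length = s.length - (cn + 1) := by simp
  rw [hlen1] at hl1 hst
  rw [hlen2] at hl2 hst
  have hg1 : ∀ k : Nat, k < cn → ((s.take cn).reverse)[k]? = s[cn - 1 - k]? := by
    intro k hk
    rw [List.getElem?_reverse (by simp; omega)]
    have e : (s.take cn).length - 1 - k = cn - 1 - k := by simp; omega
    rw [e, List.getElem?_take, if_pos (by omega)]
  have hg2 : ∀ k : Nat, (s.drop (cn + 1))[k]? = s[cn + 1 + k]? := by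
    intro k
    rw [List.getElem?_drop]
  refine ⟨by omega, by omega, by omega, ?_, ?_⟩
  · intro k hk0 hk1
    lift k to ℕ using hk0 with kn
    have hk2 : kn < rn := by exact_mod_cast hk1
    have hget := hm kn hk2
    rw [hg1 kn (by omega), hg2 kn] at hget
    have hb1 : 0 ≤ (cn : Int) - 1 - kn := by omega
    have hb2 : (cn : Int) - 1 - kn < (s.length : Int) := by omega
    have hb3 : 0 ≤ (cn : Int) + 1 + kn := by omega
    have hb4 : (cn : Int) + 1 + kn < (s.length : Int) := by omega
    rw [pyGetD_idx s ((cn : Int) - 1 - kn) hb1 hb2, pyGetD_idx s ((cn : Int) + 1 + kn) hb3 hb4]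
    have e1 : ((cn : Int) - 1 - kn).toNat = cn - 1 - kn := by omega
    have e2 : ((cn : Int) + 1 + kn).toNat = cn + 1 + kn := by omega
    rw [List.getElem?_eq_getElem (by omega), List.getElem?_eq_getElem (by omega)] at hget
    simp only [Option.some.injEq] at hget
    simp_rw [e1, e2]
    exact hget
  · rintro ⟨hq1, hq2, hq3⟩
    have hq2' : cn + rn + 1 < s.length := by exact_mod_cast hq2
    rcases hst with h | h | ⟨a, b, ha, hb, hab⟩
    · omega
    · omega
    · apply hab
      rw [hg1 rn (by omega), List.getElem?_eq_getElem (by omega)] at ha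
      rw [hg2 rn, List.getElem?_eq_getElem (by omega)] at hb
      have hb1 : 0 ≤ (cn : Int) - rn - 1 := by omega
      have hb2 : (cn : Int) - rn - 1 < (s.length : Int) := by omega
      have hb3 : 0 ≤ (cn : Int) + rn + 1 := by omega
      have hb4 : (cn : Int) + rn + 1 < (s.length : Int) := by omega
      rw [pyGetD_idx s ((cn : Int) - rn - 1) hb1 hb2,
          pyGetD_idx s ((cn : Int) + rn + 1) hb3 hb4] at hq3
      have e1 : ((cn : Int) - rn - 1).toNat = cn - 1 - rn := by omega
      have e2 : ((cn : Int) + rn + 1).toNat = cn + 1 + rn := by omega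
      simp only [e1, e2] at hq3
      simp only [Option.some.injEq] at ha hb
      rw [ha, hb] at hq3
      exact hq3

-- hence B's radius equals the reference radius
theorem womanZip_eq_radAux (s : List Int) (c : Int) (h0 : 0 ≤ c) (h1 : c < (s.length : Int)) :
    womanZip (((s.take c.toNat).reverse).zip (s.drop (c.toNat + 1))) = radAux s c 0 s.length := by
  apply RadSpec_unique s c _ _ (womanZip_RadSpec s c h0 h1)
  exact radAux_spec s c s.length 0 (by omega) (by omega) (by omega) (by omega) (by omega)

-- B's slice rebuild is the band-toggle
theorem rebuild_eq_togR (s : List Int) (a b : Int)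
    (h0 : 0 ≤ a) (hab : a ≤ b + 1) (h1 : b < (s.length : Int)) :
    s.take a.toNat ++ ((s.drop a.toNat).take ((b + 1).toNat - a.toNat)).map
        (fun x => if x = 1 then 0 else 1) ++ s.drop (b + 1).toNat
      = togR a b s := by
  apply List.ext_getElem?
  intro k
  have hR : ∀ hks : k < s.length, (togR a b s)[k]? =
      some (if a ≤ (k : Int) ∧ (k : Int) ≤ b then tog s[k] else s[k]) := by
    intro hks
    rw [List.getElem?_eq_getElem (by rw [length_togR]; exact hks)]
    exact congrArg some (getElem_togR a b s k hks)
  by_cases hks : k < s.length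
  · rw [hR hks]
    by_cases hka : k < a.toNat
    · rw [List.getElem?_append_left (by simp; omega),
          List.getElem?_append_left (by simp; omega),
          List.getElem?_take, if_pos hka, List.getElem?_eq_getElem hks,
          if_neg (by omega)]
    · by_cases hkb : k < (b + 1).toNat
      · rw [List.getElem?_append_left (by simp; omega),
            List.getElem?_append_right (by simp; omega), List.getElem?_map,
            List.getElem?_take]
        rw [if_pos (by simp; omega)]
        rw [List.getElem?_drop]
        have e : a.toNat + (k - (s.take a.toNat).length) = k := by simp; omega
        rw [e, List.getElem?_eq_getElem hks, if_pos (by omega)]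
        simp [tog]
      · rw [List.getElem?_append_right (by simp; omega), List.getElem?_drop]
        have e : (b + 1).toNat +
            (k - (s.take a.toNat ++ ((s.drop a.toNat).take ((b + 1).toNat - a.toNat)).map
              (fun x => if x = 1 then 0 else 1)).length) = k := by
          simp; omega
        rw [e, List.getElem?_eq_getElem hks, if_neg (by omega)]
  · rw [List.getElem?_eq_none (by simp; omega),
        List.getElem?_eq_none (by rw [length_togR]; omega)]

-- reading a Python negative index is reading from the list's end
theorem pyGetD_wrap (s : List Int) (k : Int) (h0 : -(s.length : Int) ≤ k) (h1 : k < 0) :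
    PySem.List.pyGetD s k 0 = PySem.List.pyGetD s ((s.length : Int) + k) 0 := by
  have hk : k = -((((-k).toNat : Nat)) : Int) := by omega
  rw [hk, PySem.List.pyGetD_neg_natCast s (-k).toNat 0 (by omega) (by omega)]
  rw [pyGetD_idx s ((s.length : Int) + -(((-k).toNat : Nat) : Int)) (by omega) (by omega)]
  apply Option.some.inj
  rw [← List.getElem?_eq_getElem, ← List.getElem?_eq_getElem]
  congr 1
  omega

-- writing a Python negative index is writing from the list's end
theorem pySetD_wrap (s : List Int) (k : Int) (v : Int)
    (h0 : -(s.length : Int) ≤ k) (h1 : k < 0) :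
    PySem.List.pySetD s k v = s.set ((s.length : Int) + k).toNat v := by
  simp only [PySem.List.pySetD, PySem.List.pySet?, PySem.List.pyIdx?]
  rw [if_neg (by omega), if_pos (by omega)]
  simp only [Option.map_some, Option.getD_some]
  congr 1
  omega

-- A's single toggle-assignment at a negative index is the one-point band at len + k
theorem womanFlip_eq_togR_neg (s : List Int) (k : Int)
    (h0 : -(s.length : Int) ≤ k) (h1 : k < 0) :
    womanFlip s k = togR ((s.length : Int) + k) ((s.length : Int) + k) s := by
  have hmain := womanFlip_eq_togR s ((s.length : Int) + k) (by omega) (by omega)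
  unfold womanFlip at hmain ⊢
  rw [PySem.List.pySetD_of_nonneg s 0 (by omega : (0:Int) ≤ (s.length : Int) + k),
      PySem.List.pySetD_of_nonneg s 1 (by omega : (0:Int) ≤ (s.length : Int) + k)] at hmain
  rw [pyGetD_wrap s k h0 h1, pySetD_wrap s k 0 h0 h1, pySetD_wrap s k 1 h0 h1]
  exact hmain

-- B computes the band-toggle of the reference radius around the normalised centre
theorem woman_alt_eq_togR (s : List Int) (n : Int) (hlen : 1 ≤ s.length) :
    woman_alt s n =
      togR (PySem.Int.mod (n - 1) (s.length : Int)
              - radAux s (PySem.Int.mod (n - 1) (s.length : Int)) 0 s.length)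
           (PySem.Int.mod (n - 1) (s.length : Int)
              + radAux s (PySem.Int.mod (n - 1) (s.length : Int)) 0 s.length) s := by
  have hpos : (0:Int) < (s.length : Int) := by exact_mod_cast hlen
  set c := PySem.Int.mod (n - 1) (s.length : Int) with hcdef
  have h0 : 0 ≤ c := PySem.Int.mod_nonneg _ hpos
  have h1 : c < (s.length : Int) := PySem.Int.mod_lt _ hpos
  have hrspec := radAux_spec s c s.length 0 (by omega) (by omega) (by omega)
    (by omega) (by omega)
  obtain ⟨hr0, hrl, hrr, -, -⟩ := hrspec
  unfold woman_alt
  rw [← hcdef]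
  simp only
  rw [PySem.List.slice_to s h0, PySem.List.slice_from s (by omega : (0:Int) ≤ c + 1)]
  have e1 : (c + 1).toNat = c.toNat + 1 := by omega
  rw [e1, womanZip_eq_radAux s c h0 h1]
  set r := radAux s c 0 s.length with hr
  rw [PySem.List.slice_to s (by omega : (0:Int) ≤ c - r),
      PySem.List.slice_from s (by omega : (0:Int) ≤ c + r + 1),
      PySem.List.slice_toNat s (by omega : (0:Int) ≤ c - r) (by omega : (0:Int) ≤ c + r + 1)]
  have e2 : (c + r + 1).toNat = ((c + r) + 1).toNat := by omega
  rw [e2]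
  exact rebuild_eq_togR s (c - r) (c + r) (by omega) (by omega) (by omega)

-- A's expansion loop computes the band-toggle of the reference radius
theorem womanWhile_eq_togR (s0 : List Int) (n : Int)
    (hn : 2 ≤ n) (hm : n < (s0.length : Int)) :
    ∀ (fuel : Nat) (i : Int), 1 ≤ i → 0 ≤ n - 1 - i → n - 1 + i < (s0.length : Int) →
      (n - 1 - i).toNat + 1 ≤ fuel →
      womanWhile (togR (n - 1 - (i - 1)) (n - 1 + (i - 1)) s0) n i fuel
        = togR (n - 1 - radAux s0 (n - 1) (i - 1) (fuel + 1))
               (n - 1 + radAux s0 (n - 1) (i - 1) (fuel + 1)) s0 := by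
  intro fuel
  induction fuel with
  | zero => intro i hi hlo hhi hfuel; omega
  | succ f ih =>
    intro i hi hlo hhi hfuel
    have hlen : (togR (n - 1 - (i - 1)) (n - 1 + (i - 1)) s0).length = s0.length :=
      length_togR _ _ s0
    have hradstep : ∀ g : Nat, radAux s0 (n-1) (i-1) (g+1)
        = if 0 ≤ (n-1) - (i-1) - 1 ∧ (n-1) + (i-1) + 1 < (s0.length : Int) ∧
              PySem.List.pyGetD s0 ((n-1) - (i-1) - 1) 0 = PySem.List.pyGetD s0 ((n-1) + (i-1) + 1) 0
          then radAux s0 (n-1) (i-1+1) g else i - 1 := by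
      intro g; rfl
    have hgl : PySem.List.pyGetD (togR (n - 1 - (i - 1)) (n - 1 + (i - 1)) s0) (n - 1 - i) 0
        = PySem.List.pyGetD s0 (n - 1 - i) 0 :=
      pyGetD_togR_outside _ _ _ s0 (by omega) (by omega) (by omega)
    have hgr : PySem.List.pyGetD (togR (n - 1 - (i - 1)) (n - 1 + (i - 1)) s0) (n - 1 + i) 0
        = PySem.List.pyGetD s0 (n - 1 + i) 0 :=
      pyGetD_togR_outside _ _ _ s0 (by omega) (by omega) (by omega)
    rw [womanWhile]
    by_cases hcond : PySem.List.pyGetD s0 (n - 1 - i) 0 = PySem.List.pyGetD s0 (n - 1 + i) 0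
    · rw [if_pos (by rw [hgl, hgr]; exact hcond)]
      have hs' :
          (if PySem.List.pyGetD (togR (n - 1 - (i - 1)) (n - 1 + (i - 1)) s0) (n - 1 - i) 0 = 1 then
             PySem.List.pySetD (PySem.List.pySetD (togR (n - 1 - (i - 1)) (n - 1 + (i - 1)) s0) (n - 1 - i) 0) (n - 1 + i) 0
           else
             PySem.List.pySetD (PySem.List.pySetD (togR (n - 1 - (i - 1)) (n - 1 + (i - 1)) s0) (n - 1 - i) 1) (n - 1 + i) 1)
            = togR (n - 1 - i) (n - 1 + i) s0 := by
        have := togR_extend (n - 1 - i) (n - 1 + i) s0 (by omega) (by omega) (by omega) hcond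
        have harg : n - 1 - i + 1 = n - 1 - (i - 1) := by ring
        have harg2 : n - 1 + i - 1 = n - 1 + (i - 1) := by ring
        rw [harg, harg2] at this
        exact this
      simp only [hs']
      have hlen2 : (togR (n - 1 - i) (n - 1 + i) s0).length = s0.length := length_togR _ _ s0
      have hcnd2 : 0 ≤ n - 1 - (i-1) - 1 ∧ n - 1 + (i-1) + 1 < (s0.length : Int) ∧
          PySem.List.pyGetD s0 (n - 1 - (i-1) - 1) 0 = PySem.List.pyGetD s0 (n - 1 + (i-1) + 1) 0 := by
        refine ⟨by omega, by omega, ?_⟩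
        have e1 : n - 1 - (i-1) - 1 = n - 1 - i := by ring
        have e2 : n - 1 + (i-1) + 1 = n - 1 + i := by ring
        rw [e1, e2]; exact hcond
      rw [hradstep (f + 1), if_pos hcnd2]
      by_cases hbreak : n - i - 1 = 0 ∨ n - 1 + i = ((togR (n - 1 - i) (n - 1 + i) s0).length : Int) - 1
      · rw [if_pos hbreak]
        rw [hlen2] at hbreak
        have hrad : radAux s0 (n-1) (i-1+1) (f+1) = i := by
          have e : i - 1 + 1 = i := by ring
          rw [e]
          apply radAux_stop
          rintro ⟨hx1, hx2, -⟩
          omega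
        rw [hrad]
      · rw [if_neg hbreak]
        rw [hlen2] at hbreak
        have harg : n - 1 - i = n - 1 - ((i + 1) - 1) := by ring
        have harg2 : n - 1 + i = n - 1 + ((i + 1) - 1) := by ring
        rw [harg, harg2]
        rw [ih (i + 1) (by omega) (by omega) (by omega) (by omega)]
        have e : i - 1 + 1 = (i + 1) - 1 := by ring
        rw [e]
    · rw [if_neg (by rw [hgl, hgr]; exact hcond)]
      rw [hradstep (f + 1), if_neg (by
            have e1 : n - 1 - (i-1) - 1 = n - 1 - i := by ring
            have e2 : n - 1 + (i-1) + 1 = n - 1 + i := by ring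
            rw [e1, e2]
            intro hx
            exact hcond hx.2.2)]

-- radAux does not depend on the fuel once it is large enough
theorem radAux_fuel (s : List Int) (c : Int) :
    ∀ (f1 f2 : Nat) (r : Int), c - r < (f1 : Int) → c - r < (f2 : Int) →
      radAux s c r f1 = radAux s c r f2 := by
  intro f1
  induction f1 with
  | zero =>
    intro f2 r h1 h2
    rw [radAux_stop s c r 0 (by omega), radAux_stop s c r f2 (by omega)]
  | succ f ih =>
    intro f2 r h1 h2
    cases f2 with
    | zero =>
      rw [radAux_stop s c r 0 (by omega), radAux_stop s c r (f+1) (by omega)]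
    | succ f2' =>
      by_cases hc : 0 ≤ c - r - 1 ∧ c + r + 1 < (s.length : Int) ∧
          PySem.List.pyGetD s (c - r - 1) 0 = PySem.List.pyGetD s (c + r + 1) 0
      · rw [radAux, if_pos hc, radAux, if_pos hc]
        exact ih f2' (r + 1) (by omega) (by omega)
      · rw [radAux_stop s c r _ hc, radAux_stop s c r _ hc]

-- ===== VERDICT =====
theorem woman_spec : Claim_equal_woman := by
  intro s n _hdom hpre
  obtain ⟨hlen1, hcase⟩ := hpre
  unfold Spec_woman
  have hpos : (0:Int) < (s.length : Int) := by exact_mod_cast hlen1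
  rcases hcase with ⟨h1, h2, h3⟩ | ⟨hn0, hrest⟩
  · -- the 1-based switch domain: the centre normalises to n - 1
    have hmod : PySem.Int.mod (n - 1) (s.length : Int) = n - 1 := by
      rw [PySem.Int.mod_eq_emod_of_pos hpos]
      exact Int.emod_eq_of_lt (by omega) (by
        by_cases h : 3 ≤ s.length
        · have := h3 h; omega
        · omega)
    have hc0 : 0 ≤ n - 1 := by omega
    have hc1 : n - 1 < (s.length : Int) := by
      by_cases h : 3 ≤ s.length
      · have := h3 h; omega
      · omega
    rw [woman_alt_eq_togR s n hlen1, hmod]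
    unfold woman
    by_cases hm1 : s.length = 1
    · rw [if_pos hm1]
      have hr : radAux s (n - 1) 0 s.length = 0 :=
        radAux_stop s (n-1) 0 s.length (by rintro ⟨hx1, hx2, -⟩; omega)
      rw [hr, womanFlip_eq_togR s (n-1) hc0 hc1]
      congr 1 <;> omega
    · rw [if_neg hm1]
      by_cases hm2 : s.length = 2
      · rw [if_pos hm2]
        have hr : radAux s (n - 1) 0 s.length = 0 :=
          radAux_stop s (n-1) 0 s.length (by rintro ⟨hx1, hx2, -⟩; omega)
        rw [hr, womanFlip_eq_togR s (n-1) hc0 hc1]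
        congr 1 <;> omega
      · rw [if_neg hm2]
        have hm3 : 3 ≤ s.length := by omega
        have hnm : n < (s.length : Int) := h3 hm3
        by_cases hguard : PySem.List.pyGetD s (n - 2) 0 ≠ PySem.List.pyGetD s n 0
            ∨ n - 1 = 0 ∨ n = (s.length : Int)
        · rw [if_pos hguard]
          have hr : radAux s (n - 1) 0 s.length = 0 := by
            apply radAux_stop
            rintro ⟨ha, hb, hcc⟩
            rcases hguard with hg | hg | hg
            · apply hg
              have e1 : n - 1 - 0 - 1 = n - 2 := by ring
              have e2 : n - 1 + 0 + 1 = n := by ring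
              rw [e1, e2] at hcc
              exact hcc
            · omega
            · omega
          rw [hr, womanFlip_eq_togR s (n-1) hc0 hc1]
          congr 1 <;> omega
        · rw [if_neg hguard]
          push Not at hguard
          obtain ⟨heq, hne0, _⟩ := hguard
          have hn2 : 2 ≤ n := by omega
          rw [womanFlip_eq_togR s (n-1) hc0 hc1]
          have hstart : togR (n-1) (n-1) s = togR (n - 1 - (1 - 1)) (n - 1 + (1 - 1)) s := by
            norm_num
          rw [hstart]
          rw [womanWhile_eq_togR s n hn2 hnm s.length 1 (by omega) (by omega) (by omega) (by omega)]
          have : radAux s (n-1) (1-1) (s.length + 1) = radAux s (n-1) 0 s.length := by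
            have e : (1:Int) - 1 = 0 := by ring
            rw [e]
            exact radAux_fuel s (n-1) (s.length + 1) s.length 0 (by omega) (by omega)
          rw [this]
  · -- n ≤ 0: A's guard fires (or len ≤ 2), so both programs do the same single toggle at s[n-1]
    have hn1 : 1 - (s.length : Int) ≤ n := by
      rcases hrest with ⟨hm, -⟩ | ⟨hm, -⟩ <;> omega
    have hmod : PySem.Int.mod (n - 1) (s.length : Int) = (s.length : Int) + (n - 1) := by
      rw [PySem.Int.mod_eq_emod_of_pos hpos]
      conv_lhs => rw [show n - 1 = ((s.length : Int) + (n - 1)) - (s.length : Int) by ring]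
      rw [Int.sub_emod_right]
      exact Int.emod_eq_of_lt (by omega) (by omega)
    have hA : woman s n = womanFlip s (n - 1) := by
      unfold woman
      by_cases hm1 : s.length = 1
      · rw [if_pos hm1]
      · rw [if_neg hm1]
        by_cases hm2 : s.length = 2
        · rw [if_pos hm2]
        · rw [if_neg hm2]
          refine if_pos (Or.inl ?_)
          rcases hrest with ⟨hm, hne⟩ | ⟨hm, hle⟩
          · exact hne
          · omega
    rw [hA, womanFlip_eq_togR_neg s (n - 1) (by omega) (by omega)]
    rw [woman_alt_eq_togR s n hlen1, hmod]
    have hr : radAux s ((s.length : Int) + (n - 1)) 0 s.length = 0 := by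
      apply radAux_stop
      rintro ⟨hx1, hx2, hx3⟩
      rcases hrest with ⟨hm, hne⟩ | ⟨hm, hle⟩
      · by_cases hn : n = 0
        · omega
        · apply hne
          have e1 : PySem.List.pyGetD s (n - 2) 0
              = PySem.List.pyGetD s ((s.length : Int) + (n - 1) - 0 - 1) 0 := by
            rw [pyGetD_wrap s (n - 2) (by omega) (by omega)]
            congr 1
            omega
          have e2 : PySem.List.pyGetD s n 0
              = PySem.List.pyGetD s ((s.length : Int) + (n - 1) + 0 + 1) 0 := by
            rw [pyGetD_wrap s n (by omega) (by omega)]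
            congr 1
            omega
          rw [e1, e2]
          exact hx3
      · omega
    rw [hr]
    congr 1 <;> omega
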